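-- pv_equiv track=rewrite | github.com/nkcs-iclab/spellxpert | csc/data/base.py | add_error_tags
-- ===== SOURCE A (Python) =====
-- def add_error_tags(string: str, errors: list[tuple[int, str, str]], opening_tag: str, closing_tag: str) -> str:
--     errors = {error[0] for error in errors}
--     output_string = ''
--     for index, char in enumerate(string):
--         if index + 1 in errors:
--             output_string += f'{opening_tag}{char}{closing_tag}'
--         else:
--             output_string += char
--     return output_string
-- ===== SOURCE B (Python) =====
-- def add_error_tags(string: str, errors: list[tuple[int, str, str]], opening_tag: str, closing_tag: str) -> str:
--     n = len(string)
--     positions = sorted({e[0] for e in errors if 1 <= e[0] <= n})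
--     parts = []
--     cursor = 0
--     for pos in positions:
--         parts.append(string[cursor:pos - 1])
--         parts.append(opening_tag + string[pos - 1] + closing_tag)
--         cursor = pos
--     parts.append(string[cursor:])
--     return ''.join(parts)
-- ===== Notes on version B (the rewrite author's own statement) =====
-- stated objective: alternative
-- what changed: Instead of scanning every character and testing set membership, B sorts the distinct in-range error positions and assembles the result by slicing untouched segments between wrapped characters with a cursor.
import Mathlib
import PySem

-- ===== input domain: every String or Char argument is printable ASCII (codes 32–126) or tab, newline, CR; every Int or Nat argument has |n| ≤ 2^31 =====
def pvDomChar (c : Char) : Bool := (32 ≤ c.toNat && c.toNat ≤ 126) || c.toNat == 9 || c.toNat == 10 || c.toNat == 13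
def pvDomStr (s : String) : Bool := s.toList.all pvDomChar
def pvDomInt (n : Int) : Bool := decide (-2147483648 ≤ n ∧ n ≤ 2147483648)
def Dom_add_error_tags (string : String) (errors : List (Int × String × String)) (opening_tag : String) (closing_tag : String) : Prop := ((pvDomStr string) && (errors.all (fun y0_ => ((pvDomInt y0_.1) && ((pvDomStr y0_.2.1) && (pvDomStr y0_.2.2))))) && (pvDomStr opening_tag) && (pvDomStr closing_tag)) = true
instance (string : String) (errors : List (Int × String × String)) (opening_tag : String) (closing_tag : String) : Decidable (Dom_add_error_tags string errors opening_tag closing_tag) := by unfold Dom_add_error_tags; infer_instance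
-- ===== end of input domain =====

-- B assembles the output from the sorted distinct in-range error positions by slicing,
-- instead of A's per-character scan with a set-membership test (objective: alternative).

-- ===== PORT A =====
-- A: errors := {e[0] for e in errors}; for index, char in enumerate(string): append wrapped/plain char.
def add_error_tags (string : String) (errors : List (Int × String × String)) (opening_tag : String) (closing_tag : String) : String :=
  let errs : PySem.Set Int := PySem.Set.ofList (errors.map (fun e => e.1))
  String.ofList ((PySem.List.enumerate string.toList 0).foldl
    (fun acc ic =>
      if PySem.Set.contains errs (ic.1 + 1) then
        acc ++ opening_tag.toList ++ [ic.2] ++ closing_tag.toList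
      else
        acc ++ [ic.2]) [])

-- ===== PORT B =====
-- B: positions = sorted({e[0] for e in errors if 1 <= e[0] <= n}); cursor/slice assembly, ''.join(parts).
-- string[pos-1] is ported as (pyGet? …).toList: the guard 1 ≤ pos ≤ n keeps the index in range, so this is exact.
def add_error_tags_alt (string : String) (errors : List (Int × String × String)) (opening_tag : String) (closing_tag : String) : String :=
  let s := string.toList
  let n : Int := PySem.Str.len string
  let positions := PySem.List.sorted
    (PySem.Set.ofList ((errors.filter (fun e => decide (1 ≤ e.1 ∧ e.1 ≤ n))).map (fun e => e.1)))
    (fun x => x) false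
  let r := positions.foldl
    (fun (acc : List (List Char) × Int) pos =>
      (acc.1 ++ [PySem.List.slice s (some acc.2) (some (pos - 1)),
                 opening_tag.toList ++ (PySem.List.pyGet? s (pos - 1)).toList ++ closing_tag.toList],
       pos)) ([], 0)
  String.ofList (PySem.Chars.join [] (r.1 ++ [PySem.List.slice s (some r.2) none]))

-- ===== PRECONDITION & SPEC =====
def Spec_add_error_tags (string : String) (errors : List (Int × String × String)) (opening_tag : String) (closing_tag : String) (out : String) : Prop := out = add_error_tags_alt string errors opening_tag closing_tag
instance (string : String) (errors : List (Int × String × String)) (opening_tag : String) (closing_tag : String) (out : String) : Decidable (Spec_add_error_tags string errors opening_tag closing_tag out) := by unfold Spec_add_error_tags; infer_instance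

-- ===== CLAIM (what is proved, stated in full; the proofs are below) =====
def Claim_equal_add_error_tags : Prop := ∀ (string : String) (errors : List (Int × String × String)) (opening_tag : String) (closing_tag : String), Dom_add_error_tags string errors opening_tag closing_tag → Spec_add_error_tags string errors opening_tag closing_tag (add_error_tags string errors opening_tag closing_tag)

-- ===== LEMMAS AND PROOFS =====

-- canonical output: the char at 0-based index i is wrapped iff P (i+1)
def pvCanon (P : Int → Bool) (ot ct : List Char) : List Char → Int → List Char
  | [], _ => []
  | c :: t, i => (if P (i + 1) then ot ++ [c] ++ ct else [c]) ++ pvCanon P ot ct t (i + 1)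

-- recursive form of B's cursor/slice assembly
def pvAsm (s ot ct : List Char) : List Int → Int → List Char
  | [], cur => PySem.List.slice s (some cur) none
  | p :: ps, cur =>
      PySem.List.slice s (some cur) (some (p - 1)) ++ ot ++ (PySem.List.pyGet? s (p - 1)).toList ++ ct
        ++ pvAsm s ot ct ps p

theorem pvCanon_append (P : Int → Bool) (ot ct : List Char) (l1 l2 : List Char) :
    ∀ i : Int, pvCanon P ot ct (l1 ++ l2) i = pvCanon P ot ct l1 i ++ pvCanon P ot ct l2 (i + l1.length) := by
  induction l1 with
  | nil => intro i; simp [pvCanon]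
  | cons c t ih =>
      intro i
      have h : i + 1 + (t.length : Int) = i + ((t.length : Int) + 1) := by ring
      simp only [List.cons_append, pvCanon, ih (i + 1), List.length_cons, List.append_assoc,
        Nat.cast_add, Nat.cast_one, h]

theorem pvCanon_no_hit (P : Int → Bool) (ot ct : List Char) :
    ∀ (l : List Char) (i : Int), (∀ j : Int, i < j → j ≤ i + l.length → P j = false) →
      pvCanon P ot ct l i = l := by
  intro l
  induction l with
  | nil => intro i _; simp [pvCanon]
  | cons c t ih =>
      intro i h
      have h1 : P (i + 1) = false := h (i + 1) (by omega) (by simp only [List.length_cons]; push_cast; omega)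
      simp only [pvCanon, h1, Bool.false_eq_true, if_false, List.singleton_append, List.cons_inj_right]
      refine ih (i + 1) (fun j hj1 hj2 => h j (by omega) ?_)
      simp only [List.length_cons]
      push_cast
      omega

theorem pvFoldA (P : Int → Bool) (ot ct : List Char) :
    ∀ (l : List Char) (i : Int) (acc : List Char),
      (PySem.List.enumerate l i).foldl
        (fun acc ic => if P (ic.1 + 1) then acc ++ ot ++ [ic.2] ++ ct else acc ++ [ic.2]) acc
      = acc ++ pvCanon P ot ct l i := by
  intro l
  induction l with
  | nil => intro i acc; simp [PySem.List.enumerate_nil, pvCanon]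
  | cons c t ih =>
      intro i acc
      simp only [PySem.List.enumerate_cons, List.foldl_cons, pvCanon, ih]
      by_cases h : P (i + 1) = true <;> simp [h, List.append_assoc]

theorem pvJoinNil (l : List (List Char)) : PySem.Chars.join [] l = l.flatten := by
  induction l with
  | nil => rfl
  | cons a t ih =>
      cases t with
      | nil => simp [PySem.Chars.join_singleton]
      | cons b t' => rw [PySem.Chars.join_cons_cons, ih]; simp

theorem pvFoldB (s ot ct : List Char) :
    ∀ (ps : List Int) (parts : List (List Char)) (cur : Int),
      ((ps.foldl
        (fun (acc : List (List Char) × Int) pos =>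
          (acc.1 ++ [PySem.List.slice s (some acc.2) (some (pos - 1)),
                     ot ++ (PySem.List.pyGet? s (pos - 1)).toList ++ ct], pos)) (parts, cur)).1
        ++ [PySem.List.slice s
             (some ((ps.foldl
               (fun (acc : List (List Char) × Int) pos =>
                 (acc.1 ++ [PySem.List.slice s (some acc.2) (some (pos - 1)),
                            ot ++ (PySem.List.pyGet? s (pos - 1)).toList ++ ct], pos)) (parts, cur)).2))
             none]).flatten
      = parts.flatten ++ pvAsm s ot ct ps cur := by
  intro ps
  induction ps with
  | nil => intro parts cur; simp [pvAsm]
  | cons p ps ih =>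
      intro parts cur
      simp only [List.foldl_cons, pvAsm, ih]
      simp [List.append_assoc]

theorem pvAsm_eq_canon (s ot ct : List Char) (P : Int → Bool) :
    ∀ (ps : List Int) (cur : Int), 0 ≤ cur → cur ≤ (s.length : Int) →
      ps.Pairwise (· < ·) →
      (∀ p ∈ ps, cur < p ∧ p ≤ (s.length : Int)) →
      (∀ j : Int, cur < j → j ≤ (s.length : Int) → P j = decide (j ∈ ps)) →
      pvAsm s ot ct ps cur = pvCanon P ot ct (s.drop cur.toNat) cur := by
  intro ps
  induction ps with
  | nil =>
      intro cur h0 hn _ _ hP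
      rw [pvAsm, PySem.List.slice_from s h0, pvCanon_no_hit]
      intro j hj1 hj2
      rw [hP j hj1 (by simp only [List.length_drop] at hj2; omega)]
      simp
  | cons p ps ih =>
      intro cur h0 hn hpw hmem hP
      obtain ⟨hcp, hpn⟩ := hmem p List.mem_cons_self
      have hps : ∀ q ∈ ps, p < q := (List.pairwise_cons.mp hpw).1
      have hk : (p - 1).toNat < s.length := by omega
      have hdd : s.drop (p - 1).toNat = (s.drop cur.toNat).drop ((p - 1).toNat - cur.toNat) := by
        rw [List.drop_drop]; congr 1; omega
      have hsplit : s.drop cur.toNat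
          = (s.drop cur.toNat).take ((p - 1).toNat - cur.toNat)
            ++ (s[(p - 1).toNat] :: s.drop p.toNat) := by
        have hpp : p.toNat = (p - 1).toNat + 1 := by omega
        rw [hpp, List.getElem_cons_drop, hdd, List.take_append_drop]
      have hlen : ((s.drop cur.toNat).take ((p - 1).toNat - cur.toNat)).length
          = (p - 1).toNat - cur.toNat := by
        simp only [List.length_take, List.length_drop]
        omega
      rw [pvAsm, hsplit, pvCanon_append, hlen]
      have hidx : cur + (((p - 1).toNat - cur.toNat : Nat) : Int) = p - 1 := by omega
      rw [hidx]
      -- first block: untouched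
      have hblock : pvCanon P ot ct ((s.drop cur.toNat).take ((p - 1).toNat - cur.toNat)) cur
          = (s.drop cur.toNat).take ((p - 1).toNat - cur.toNat) := by
        apply pvCanon_no_hit
        intro j hj1 hj2
        rw [hlen] at hj2
        have hjp : j < p := by omega
        rw [hP j hj1 (by omega)]
        simp only [decide_eq_false_iff_not, List.mem_cons, not_or]
        exact ⟨by omega, fun hq => absurd (hps j hq) (by omega)⟩
      rw [hblock]
      -- head char: wrapped
      have hcanon_cons : pvCanon P ot ct (s[(p - 1).toNat] :: s.drop p.toNat) (p - 1)
          = ot ++ [s[(p - 1).toNat]] ++ ct ++ pvCanon P ot ct (s.drop p.toNat) p := by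
        rw [pvCanon]
        have h1 : p - 1 + 1 = p := by ring
        rw [h1, hP p hcp hpn]
        simp
      rw [hcanon_cons]
      -- tail: induction hypothesis
      rw [← ih p (by omega) hpn (List.pairwise_cons.mp hpw).2
            (fun q hq => ⟨hps q hq, (hmem q (List.mem_cons_of_mem p hq)).2⟩)
            (fun j hj1 hj2 => by
              rw [hP j (by omega) hj2]
              have hne : j ≠ p := by omega
              simp only [List.mem_cons, decide_eq_decide]
              exact ⟨fun h => h.resolve_left hne, Or.inr⟩)]
      -- slice and pyGet? on the A-side shape
      rw [PySem.List.slice_toNat s h0 (by omega), PySem.List.pyGet?_eq_some_getElem s (by omega) (by omega)]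
      simp [List.append_assoc]

-- ===== VERDICT (by name: the statement is the Claim_ definition above) =====
theorem add_error_tags_spec : Claim_equal_add_error_tags := by
  intro string errors ot ct _
  unfold Spec_add_error_tags
  simp only [add_error_tags, add_error_tags_alt, PySem.Str.len_eq]
  rw [pvFoldA (fun j => PySem.Set.contains (PySem.Set.ofList (errors.map (fun e => e.1))) j)
        ot.toList ct.toList string.toList 0 []]
  rw [pvJoinNil]
  rw [pvFoldB string.toList ot.toList ct.toList _ [] 0]
  rw [pvAsm_eq_canon string.toList ot.toList ct.toList
        (fun j => PySem.Set.contains (PySem.Set.ofList (errors.map (fun e => e.1))) j)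
        _ 0 le_rfl (by positivity)
        (by exact PySem.List.sorted_ofList_pairwise_lt _)
        (by
          intro p hp
          simp only [PySem.List.mem_sorted, PySem.Set.mem_ofList, List.mem_map,
            List.mem_filter, decide_eq_true_eq] at hp
          obtain ⟨e, ⟨-, h1, h2⟩, rfl⟩ := hp
          exact ⟨by omega, h2⟩)
        (by
          intro j hj1 hj2
          show (PySem.Set.ofList (errors.map (fun e => e.1))).contains j = _
          have h1 : PySem.Set.contains (PySem.Set.ofList (errors.map (fun e => e.1))) j
              = decide (j ∈ PySem.Set.ofList (errors.map (fun e => e.1))) := by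
            simp [PySem.Set.contains]
          rw [h1]
          simp only [PySem.Set.mem_ofList, decide_eq_decide, PySem.List.mem_sorted,
            List.mem_map, List.mem_filter, decide_eq_true_eq]
          constructor
          · rintro ⟨e, he, rfl⟩
            exact ⟨e, ⟨he, by omega⟩, rfl⟩
          · rintro ⟨e, ⟨he, -⟩, rfl⟩
            exact ⟨e, he, rfl⟩)]
  simp
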